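-- pv_equiv track=rewrite | github.com/Masin-M/GearSwap-Optimizer | magic_api_additions.py | convert_magic_buffs_to_caster_stats
-- ===== SOURCE A (Python) =====
-- from typing import Dict, List, Optional, Any
--
-- MAGIC_BUFF_ADDITIONS = {
--     # Add to existing "cor" section:
--     "cor_magic": {
--         "Wizard's Roll XI": {"magic_attack": 50},
--         "Wizard's Roll X": {"magic_attack": 30},
--         "Warlock's Roll XI": {"magic_accuracy": 52},
--         "Warlock's Roll X": {"magic_accuracy": 32},
--     },
--     # Add to existing "geo" section:
--     "geo_magic": {
--         "Geo-Acumen": {"magic_attack_pct": 35},  # 35% MAB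
--         "Indi-Acumen": {"magic_attack_pct": 20},
--         "Geo-Focus": {"magic_accuracy": 75},
--         "Indi-Focus": {"magic_accuracy": 45},
--         "Geo-Languor": {"magic_evasion_down": 75},  # Target debuff
--         "Indi-Languor": {"magic_evasion_down": 45},
--         "Geo-Malaise": {"magic_defense_down": 35},  # Target debuff
--         "Indi-Malaise": {"magic_defense_down": 20},
--     },
--     # SCH-specific abilities
--     "sch": {
--         "Ebullience": {"magic_damage_mult": 40},  # +40% magic damage on next spell
--         "Immanence": {"skillchain_enabled": True},
--         "Dark Arts": {"dark_magic_cast_time": -10, "dark_magic_recast": -10},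
--         "Light Arts": {"enhancing_cast_time": -10, "healing_cast_time": -10},
--     },
--     # Magic-specific food
--     "food_magic": {
--         "Tropical Crepe": {"INT": 8, "magic_attack": 60, "magic_accuracy": 60},
--         "Pear Crepe": {"INT": 6, "magic_attack": 50, "magic_accuracy": 50},
--         "Miso Ramen +1": {"DEX": 8, "accuracy": 90, "ranged_accuracy": 90, "magic_accuracy": 90},
--         "Seafood Stew": {"INT": 6, "MND": 6, "magic_attack": 40},
--         "Rolanberry Pie +1": {"INT": 7, "MP": 70},
--     },
-- }
--
-- def convert_magic_buffs_to_caster_stats(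
--     ui_buffs: Dict[str, List[str]],
--     food: str = "",
-- ) -> Dict[str, int]:
--     """
--     Convert UI-format magic buffs to stat bonuses.
--
--     Args:
--         ui_buffs: {"geo": ["Geo-Acumen"], "cor": ["Wizard's Roll XI"], ...}
--         food: Food name
--
--     Returns:
--         Dict of stat bonuses to apply to CasterStats
--     """
--     bonuses = {
--         "INT": 0,
--         "MND": 0,
--         "magic_attack": 0,
--         "magic_accuracy": 0,
--         "magic_attack_pct": 0,  # Percentage MAB (like Geo-Acumen)
--     }
--
--     # Process GEO magic buffs
--     if "geo" in ui_buffs: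
--         for buff in ui_buffs["geo"]:
--             if buff in MAGIC_BUFF_ADDITIONS.get("geo_magic", {}):
--                 b = MAGIC_BUFF_ADDITIONS["geo_magic"][buff]
--                 bonuses["magic_attack"] += b.get("magic_attack", 0)
--                 bonuses["magic_accuracy"] += b.get("magic_accuracy", 0)
--                 bonuses["magic_attack_pct"] += b.get("magic_attack_pct", 0)
--
--     # Process COR magic rolls
--     if "cor" in ui_buffs:
--         for buff in ui_buffs["cor"]:
--             if buff in MAGIC_BUFF_ADDITIONS.get("cor_magic", {}):
--                 b = MAGIC_BUFF_ADDITIONS["cor_magic"][buff]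
--                 bonuses["magic_attack"] += b.get("magic_attack", 0)
--                 bonuses["magic_accuracy"] += b.get("magic_accuracy", 0)
--
--     # Process food
--     if food and food in MAGIC_BUFF_ADDITIONS.get("food_magic", {}):
--         f = MAGIC_BUFF_ADDITIONS["food_magic"][food]
--         bonuses["INT"] += f.get("INT", 0)
--         bonuses["MND"] += f.get("MND", 0)
--         bonuses["magic_attack"] += f.get("magic_attack", 0)
--         bonuses["magic_accuracy"] += f.get("magic_accuracy", 0)
--
--     return bonuses
-- ===== SOURCE B (Python) =====
-- from typing import Dict, List
--
-- MAGIC_BUFF_ADDITIONS = {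
--     "cor_magic": {
--         "Wizard's Roll XI": {"magic_attack": 50},
--         "Wizard's Roll X": {"magic_attack": 30},
--         "Warlock's Roll XI": {"magic_accuracy": 52},
--         "Warlock's Roll X": {"magic_accuracy": 32},
--     },
--     "geo_magic": {
--         "Geo-Acumen": {"magic_attack_pct": 35},
--         "Indi-Acumen": {"magic_attack_pct": 20},
--         "Geo-Focus": {"magic_accuracy": 75},
--         "Indi-Focus": {"magic_accuracy": 45},
--         "Geo-Languor": {"magic_evasion_down": 75},
--         "Indi-Languor": {"magic_evasion_down": 45},
--         "Geo-Malaise": {"magic_defense_down": 35},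
--         "Indi-Malaise": {"magic_defense_down": 20},
--     },
--     "sch": {
--         "Ebullience": {"magic_damage_mult": 40},
--         "Immanence": {"skillchain_enabled": True},
--         "Dark Arts": {"dark_magic_cast_time": -10, "dark_magic_recast": -10},
--         "Light Arts": {"enhancing_cast_time": -10, "healing_cast_time": -10},
--     },
--     "food_magic": {
--         "Tropical Crepe": {"INT": 8, "magic_attack": 60, "magic_accuracy": 60},
--         "Pear Crepe": {"INT": 6, "magic_attack": 50, "magic_accuracy": 50},
--         "Miso Ramen +1": {"DEX": 8, "accuracy": 90, "ranged_accuracy": 90, "magic_accuracy": 90},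
--         "Seafood Stew": {"INT": 6, "MND": 6, "magic_attack": 40},
--         "Rolanberry Pie +1": {"INT": 7, "MP": 70},
--     },
-- }
--
--
-- def convert_magic_buffs_to_caster_stats(
--     ui_buffs: Dict[str, List[str]],
--     food: str = "",
-- ) -> Dict[str, int]:
--     bonuses = {
--         "INT": 0,
--         "MND": 0,
--         "magic_attack": 0,
--         "magic_accuracy": 0,
--         "magic_attack_pct": 0,
--     }
--     # Collect every applicable buff entry, then accumulate generically.
--     matched = []
--     for section, table in (("geo", "geo_magic"), ("cor", "cor_magic")):
--         src = MAGIC_BUFF_ADDITIONS.get(table, {})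
--         for buff in ui_buffs.get(section, []):
--             if buff in src:
--                 matched.append(src[buff])
--     if food:
--         entry = MAGIC_BUFF_ADDITIONS.get("food_magic", {}).get(food)
--         if entry is not None:
--             matched.append(entry)
--     for entry in matched:
--         for key, value in entry.items():
--             if key in bonuses:
--                 bonuses[key] += value
--     return bonuses
-- ===== Notes on version B (the rewrite author's own statement) =====
-- stated objective: simpler
-- what changed: B replaces the three hardcoded per-section extraction blocks (each naming specific stat keys) with one generic pass: it first collects the matched buff/food entry dicts from a table-driven section list, then accumulates any entry key that is one of the five bonus keys.
import Mathlib
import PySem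

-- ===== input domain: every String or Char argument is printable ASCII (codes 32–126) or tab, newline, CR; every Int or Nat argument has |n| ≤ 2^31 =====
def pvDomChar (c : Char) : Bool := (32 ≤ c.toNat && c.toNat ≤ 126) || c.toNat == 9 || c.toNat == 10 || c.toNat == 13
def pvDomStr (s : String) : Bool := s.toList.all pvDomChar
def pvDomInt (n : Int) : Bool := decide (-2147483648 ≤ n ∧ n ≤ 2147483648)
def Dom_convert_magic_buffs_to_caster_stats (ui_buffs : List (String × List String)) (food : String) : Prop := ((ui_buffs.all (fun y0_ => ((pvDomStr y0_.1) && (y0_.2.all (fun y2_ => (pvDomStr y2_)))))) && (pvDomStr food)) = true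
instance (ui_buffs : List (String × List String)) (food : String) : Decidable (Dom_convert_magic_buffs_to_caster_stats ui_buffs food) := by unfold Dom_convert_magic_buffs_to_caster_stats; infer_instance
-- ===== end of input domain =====

-- B replaces A's three hardcoded per-section extraction blocks by one generic collect-then-accumulate pass; objective: simpler.

-- ===== PORT A =====
-- Module constant MAGIC_BUFF_ADDITIONS (shared data, used by both programs). The "sch" section is
-- omitted: its values mix booleans with ints (not representable as Dict String Int) and the
-- function never reads it, so every lookup the ports perform is unaffected.
def MAGIC_BUFF_ADDITIONS : PySem.Dict String (PySem.Dict String (PySem.Dict String Int)) :=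
  PySem.Dict.mk [
    ("cor_magic", PySem.Dict.mk [
      ("Wizard's Roll XI", PySem.Dict.mk [("magic_attack", 50)]),
      ("Wizard's Roll X", PySem.Dict.mk [("magic_attack", 30)]),
      ("Warlock's Roll XI", PySem.Dict.mk [("magic_accuracy", 52)]),
      ("Warlock's Roll X", PySem.Dict.mk [("magic_accuracy", 32)])]),
    ("geo_magic", PySem.Dict.mk [
      ("Geo-Acumen", PySem.Dict.mk [("magic_attack_pct", 35)]),
      ("Indi-Acumen", PySem.Dict.mk [("magic_attack_pct", 20)]),
      ("Geo-Focus", PySem.Dict.mk [("magic_accuracy", 75)]),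
      ("Indi-Focus", PySem.Dict.mk [("magic_accuracy", 45)]),
      ("Geo-Languor", PySem.Dict.mk [("magic_evasion_down", 75)]),
      ("Indi-Languor", PySem.Dict.mk [("magic_evasion_down", 45)]),
      ("Geo-Malaise", PySem.Dict.mk [("magic_defense_down", 35)]),
      ("Indi-Malaise", PySem.Dict.mk [("magic_defense_down", 20)])]),
    ("food_magic", PySem.Dict.mk [
      ("Tropical Crepe", PySem.Dict.mk [("INT", 8), ("magic_attack", 60), ("magic_accuracy", 60)]),
      ("Pear Crepe", PySem.Dict.mk [("INT", 6), ("magic_attack", 50), ("magic_accuracy", 50)]),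
      ("Miso Ramen +1", PySem.Dict.mk [("DEX", 8), ("accuracy", 90), ("ranged_accuracy", 90), ("magic_accuracy", 90)]),
      ("Seafood Stew", PySem.Dict.mk [("INT", 6), ("MND", 6), ("magic_attack", 40)]),
      ("Rolanberry Pie +1", PySem.Dict.mk [("INT", 7), ("MP", 70)])])]

-- A's geo loop body: 'if buff in ...get("geo_magic", {}): b = ...; bonuses[k] += b.get(k, 0)'.
-- bonuses[k] += v is modeled by modify k 0 (· + v): the five keys are always present, so the
-- default 0 is never used and this equals Python's d[k] = d[k] + v.
def pvGeoStep (bs : PySem.Dict String Int) (buff : String) : PySem.Dict String Int :=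
  match (MAGIC_BUFF_ADDITIONS.getD "geo_magic" PySem.Dict.empty).get? buff with
  | some b =>
      ((bs.modify "magic_attack" 0 (· + b.getD "magic_attack" 0)).modify
          "magic_accuracy" 0 (· + b.getD "magic_accuracy" 0)).modify
        "magic_attack_pct" 0 (· + b.getD "magic_attack_pct" 0)
  | none => bs

-- A's cor loop body.
def pvCorStep (bs : PySem.Dict String Int) (buff : String) : PySem.Dict String Int :=
  match (MAGIC_BUFF_ADDITIONS.getD "cor_magic" PySem.Dict.empty).get? buff with
  | some b =>
      (bs.modify "magic_attack" 0 (· + b.getD "magic_attack" 0)).modify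
        "magic_accuracy" 0 (· + b.getD "magic_accuracy" 0)
  | none => bs

-- A's food block body (once the food entry f has been found).
def pvFoodApply (bs : PySem.Dict String Int) (f : PySem.Dict String Int) : PySem.Dict String Int :=
  (((bs.modify "INT" 0 (· + f.getD "INT" 0)).modify "MND" 0 (· + f.getD "MND" 0)).modify
      "magic_attack" 0 (· + f.getD "magic_attack" 0)).modify
    "magic_accuracy" 0 (· + f.getD "magic_accuracy" 0)

def convert_magic_buffs_to_caster_stats (ui_buffs : List (String × List String)) (food : String) : List (String × Int) :=
  let bonuses : PySem.Dict String Int :=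
    PySem.Dict.mk [("INT", 0), ("MND", 0), ("magic_attack", 0), ("magic_accuracy", 0), ("magic_attack_pct", 0)]
  let ub : PySem.Dict String (List String) := PySem.Dict.mk ui_buffs
  -- if "geo" in ui_buffs: for buff in ui_buffs["geo"]: ...
  let bonuses :=
    match ub.get? "geo" with
    | some lst => lst.foldl pvGeoStep bonuses
    | none => bonuses
  -- if "cor" in ui_buffs: for buff in ui_buffs["cor"]: ...
  let bonuses :=
    match ub.get? "cor" with
    | some lst => lst.foldl pvCorStep bonuses
    | none => bonuses
  -- if food and food in ...get("food_magic", {}): ...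
  let bonuses :=
    if food = "" then bonuses
    else
      match (MAGIC_BUFF_ADDITIONS.getD "food_magic" PySem.Dict.empty).get? food with
      | some f => pvFoodApply bonuses f
      | none => bonuses
  bonuses.items

-- ===== PORT B =====
-- inner loop of B's section pass: collect the matched entry dicts of one UI section.
def pvCollectSection (ui_buffs : List (String × List String))
    (acc : List (PySem.Dict String Int)) (st : String × String) : List (PySem.Dict String Int) :=
  let src := MAGIC_BUFF_ADDITIONS.getD st.2 PySem.Dict.empty
  ((PySem.Dict.mk ui_buffs).getD st.1 []).foldl
    (fun acc buff =>
      match src.get? buff with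
      | some d => acc ++ [d]
      | none => acc) acc

-- B's generic accumulation: for key, value in entry.items(): if key in bonuses: bonuses[key] += value
def pvAddEntry (bs : PySem.Dict String Int) (e : PySem.Dict String Int) : PySem.Dict String Int :=
  e.items.foldl (fun bs kv => if bs.contains kv.1 then bs.modify kv.1 0 (· + kv.2) else bs) bs

def convert_magic_buffs_to_caster_stats_alt (ui_buffs : List (String × List String)) (food : String) : List (String × Int) :=
  let bonuses : PySem.Dict String Int :=
    PySem.Dict.mk [("INT", 0), ("MND", 0), ("magic_attack", 0), ("magic_accuracy", 0), ("magic_attack_pct", 0)]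
  let matched := [("geo", "geo_magic"), ("cor", "cor_magic")].foldl (pvCollectSection ui_buffs) []
  let matched :=
    if food = "" then matched
    else
      match (MAGIC_BUFF_ADDITIONS.getD "food_magic" PySem.Dict.empty).get? food with
      | some e => matched ++ [e]
      | none => matched
  (matched.foldl pvAddEntry bonuses).items

-- ===== PRECONDITION & SPEC =====
def Spec_convert_magic_buffs_to_caster_stats (ui_buffs : List (String × List String)) (food : String) (out : List (String × Int)) : Prop := out = convert_magic_buffs_to_caster_stats_alt ui_buffs food
instance (ui_buffs : List (String × List String)) (food : String) (out : List (String × Int)) : Decidable (Spec_convert_magic_buffs_to_caster_stats ui_buffs food out) := by unfold Spec_convert_magic_buffs_to_caster_stats; infer_instance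

-- ===== CLAIM (what is proved, stated in full; the proofs are below) =====
def Claim_equal_convert_magic_buffs_to_caster_stats : Prop := ∀ (ui_buffs : List (String × List String)) (food : String), Dom_convert_magic_buffs_to_caster_stats ui_buffs food → Spec_convert_magic_buffs_to_caster_stats ui_buffs food (convert_magic_buffs_to_caster_stats ui_buffs food)

-- ===== LEMMAS AND PROOFS =====

-- the bonuses dict always has exactly these five keys, in this order
def St (i m a c p : Int) : PySem.Dict String Int :=
  PySem.Dict.mk [("INT", i), ("MND", m), ("magic_attack", a), ("magic_accuracy", c), ("magic_attack_pct", p)]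


theorem get?_mk_nil {ν : Type} (k : String) : (PySem.Dict.mk ([] : List (String × ν))).get? k = none := rfl

-- the three inner tables as literals
def geoT : PySem.Dict String (PySem.Dict String Int) := MAGIC_BUFF_ADDITIONS.getD "geo_magic" PySem.Dict.empty
def corT : PySem.Dict String (PySem.Dict String Int) := MAGIC_BUFF_ADDITIONS.getD "cor_magic" PySem.Dict.empty
def foodT : PySem.Dict String (PySem.Dict String Int) := MAGIC_BUFF_ADDITIONS.getD "food_magic" PySem.Dict.empty

theorem foldl_collect (src : PySem.Dict String (PySem.Dict String Int)) (l : List String) :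
    ∀ acc : List (PySem.Dict String Int),
      l.foldl (fun acc buff =>
        match src.get? buff with
        | some d => acc ++ [d]
        | none => acc) acc = acc ++ l.filterMap (fun b => src.get? b) := by
  induction l with
  | nil => intro acc; simp
  | cons b l ih =>
    intro acc
    cases h : src.get? b <;> simp [h, ih]

-- per-buff agreement + shape preservation, per concrete table entry
set_option maxHeartbeats 1000000 in
theorem geo_step (buff : String) (i m a c p : Int) :
    ∃ i' m' a' c' p',
      pvGeoStep (St i m a c p) buff = St i' m' a' c' p' ∧
      (match geoT.get? buff with
       | some d => pvAddEntry (St i m a c p) d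
       | none => St i m a c p) = St i' m' a' c' p' := by
  by_cases h1 : "Geo-Acumen" = buff
  · subst h1
    refine ⟨_, _, _, _, _, rfl, ?_⟩
    show St i m a c (p + 35) = St i m (a + 0) (c + 0) (p + 35)
    simp
  by_cases h2 : "Indi-Acumen" = buff
  · subst h2
    refine ⟨_, _, _, _, _, rfl, ?_⟩
    show St i m a c (p + 20) = St i m (a + 0) (c + 0) (p + 20)
    simp
  by_cases h3 : "Geo-Focus" = buff
  · subst h3
    refine ⟨_, _, _, _, _, rfl, ?_⟩
    show St i m a (c + 75) p = St i m (a + 0) (c + 75) (p + 0)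
    simp
  by_cases h4 : "Indi-Focus" = buff
  · subst h4
    refine ⟨_, _, _, _, _, rfl, ?_⟩
    show St i m a (c + 45) p = St i m (a + 0) (c + 45) (p + 0)
    simp
  by_cases h5 : "Geo-Languor" = buff
  · subst h5
    refine ⟨_, _, _, _, _, rfl, ?_⟩
    show St i m a c p = St i m (a + 0) (c + 0) (p + 0)
    simp
  by_cases h6 : "Indi-Languor" = buff
  · subst h6
    refine ⟨_, _, _, _, _, rfl, ?_⟩
    show St i m a c p = St i m (a + 0) (c + 0) (p + 0)
    simp
  by_cases h7 : "Geo-Malaise" = buff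
  · subst h7
    refine ⟨_, _, _, _, _, rfl, ?_⟩
    show St i m a c p = St i m (a + 0) (c + 0) (p + 0)
    simp
  by_cases h8 : "Indi-Malaise" = buff
  · subst h8
    refine ⟨_, _, _, _, _, rfl, ?_⟩
    show St i m a c p = St i m (a + 0) (c + 0) (p + 0)
    simp
  · have h0 : (MAGIC_BUFF_ADDITIONS.getD "geo_magic" PySem.Dict.empty).get? buff = none := by
      rw [show MAGIC_BUFF_ADDITIONS.getD "geo_magic" PySem.Dict.empty = (PySem.Dict.mk [
      ("Geo-Acumen", PySem.Dict.mk [("magic_attack_pct", 35)]),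
      ("Indi-Acumen", PySem.Dict.mk [("magic_attack_pct", 20)]),
      ("Geo-Focus", PySem.Dict.mk [("magic_accuracy", 75)]),
      ("Indi-Focus", PySem.Dict.mk [("magic_accuracy", 45)]),
      ("Geo-Languor", PySem.Dict.mk [("magic_evasion_down", 75)]),
      ("Indi-Languor", PySem.Dict.mk [("magic_evasion_down", 45)]),
      ("Geo-Malaise", PySem.Dict.mk [("magic_defense_down", 35)]),
      ("Indi-Malaise", PySem.Dict.mk [("magic_defense_down", 20)])]) from rfl]
      simp [PySem.Dict.get?_mk_cons, h1, h2, h3, h4, h5, h6, h7, h8, get?_mk_nil]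
    exact ⟨i, m, a, c, p, by simp [pvGeoStep, h0], by simp only [geoT, h0]⟩

set_option maxHeartbeats 1000000 in
theorem cor_step (buff : String) (i m a c p : Int) :
    ∃ i' m' a' c' p',
      pvCorStep (St i m a c p) buff = St i' m' a' c' p' ∧
      (match corT.get? buff with
       | some d => pvAddEntry (St i m a c p) d
       | none => St i m a c p) = St i' m' a' c' p' := by
  by_cases h1 : "Wizard's Roll XI" = buff
  · subst h1
    refine ⟨_, _, _, _, _, rfl, ?_⟩
    show St i m (a + 50) c p = St i m (a + 50) (c + 0) p
    simp
  by_cases h2 : "Wizard's Roll X" = buff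
  · subst h2
    refine ⟨_, _, _, _, _, rfl, ?_⟩
    show St i m (a + 30) c p = St i m (a + 30) (c + 0) p
    simp
  by_cases h3 : "Warlock's Roll XI" = buff
  · subst h3
    refine ⟨_, _, _, _, _, rfl, ?_⟩
    show St i m a (c + 52) p = St i m (a + 0) (c + 52) p
    simp
  by_cases h4 : "Warlock's Roll X" = buff
  · subst h4
    refine ⟨_, _, _, _, _, rfl, ?_⟩
    show St i m a (c + 32) p = St i m (a + 0) (c + 32) p
    simp
  · have h0 : (MAGIC_BUFF_ADDITIONS.getD "cor_magic" PySem.Dict.empty).get? buff = none := by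
      rw [show MAGIC_BUFF_ADDITIONS.getD "cor_magic" PySem.Dict.empty = (PySem.Dict.mk [
      ("Wizard's Roll XI", PySem.Dict.mk [("magic_attack", 50)]),
      ("Wizard's Roll X", PySem.Dict.mk [("magic_attack", 30)]),
      ("Warlock's Roll XI", PySem.Dict.mk [("magic_accuracy", 52)]),
      ("Warlock's Roll X", PySem.Dict.mk [("magic_accuracy", 32)])]) from rfl]
      simp [PySem.Dict.get?_mk_cons, h1, h2, h3, h4, get?_mk_nil]
    exact ⟨i, m, a, c, p, by simp [pvCorStep, h0], by simp only [corT, h0]⟩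

set_option maxHeartbeats 1000000 in
theorem food_step (food : String) (i m a c p : Int) :
    (match foodT.get? food with
     | some f => pvFoodApply (St i m a c p) f
     | none => St i m a c p) =
    (match foodT.get? food with
     | some f => pvAddEntry (St i m a c p) f
     | none => St i m a c p) := by
  by_cases h1 : "Tropical Crepe" = food
  · subst h1
    show St (i + 8) (m + 0) (a + 60) (c + 60) p = St (i + 8) m (a + 60) (c + 60) p
    simp
  by_cases h2 : "Pear Crepe" = food
  · subst h2
    show St (i + 6) (m + 0) (a + 50) (c + 50) p = St (i + 6) m (a + 50) (c + 50) p
    simp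
  by_cases h3 : "Miso Ramen +1" = food
  · subst h3
    show St (i + 0) (m + 0) (a + 0) (c + 90) p = St i m a (c + 90) p
    simp
  by_cases h4 : "Seafood Stew" = food
  · subst h4
    show St (i + 6) (m + 6) (a + 40) (c + 0) p = St (i + 6) (m + 6) (a + 40) c p
    simp
  by_cases h5 : "Rolanberry Pie +1" = food
  · subst h5
    show St (i + 7) (m + 0) (a + 0) (c + 0) p = St (i + 7) m a c p
    simp
  · have h0 : foodT.get? food = none := by
      rw [show foodT = (PySem.Dict.mk [
      ("Tropical Crepe", PySem.Dict.mk [("INT", 8), ("magic_attack", 60), ("magic_accuracy", 60)]),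
      ("Pear Crepe", PySem.Dict.mk [("INT", 6), ("magic_attack", 50), ("magic_accuracy", 50)]),
      ("Miso Ramen +1", PySem.Dict.mk [("DEX", 8), ("accuracy", 90), ("ranged_accuracy", 90), ("magic_accuracy", 90)]),
      ("Seafood Stew", PySem.Dict.mk [("INT", 6), ("MND", 6), ("magic_attack", 40)]),
      ("Rolanberry Pie +1", PySem.Dict.mk [("INT", 7), ("MP", 70)])]) from rfl]
      simp [PySem.Dict.get?_mk_cons, h1, h2, h3, h4, h5, get?_mk_nil]
    simp [h0]

theorem geo_fold (l : List String) :
    ∀ i m a c p : Int,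
      l.foldl pvGeoStep (St i m a c p) =
        (l.filterMap (fun b => geoT.get? b)).foldl pvAddEntry (St i m a c p) ∧
      ∃ i' m' a' c' p', l.foldl pvGeoStep (St i m a c p) = St i' m' a' c' p' := by
  induction l with
  | nil => intro i m a c p; exact ⟨rfl, i, m, a, c, p, rfl⟩
  | cons b l ih =>
    intro i m a c p
    obtain ⟨i', m', a', c', p', hA, hB⟩ := geo_step b i m a c p
    refine ⟨?_, ?_⟩
    · cases hg : geoT.get? b with
      | some d =>
        simp only [hg] at hB
        simp only [List.foldl_cons, List.filterMap_cons, hg]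
        rw [hA, hB]
        exact (ih i' m' a' c' p').1
      | none =>
        simp only [hg] at hB
        simp only [List.foldl_cons, List.filterMap_cons, hg]
        rw [hA, hB]
        exact (ih i' m' a' c' p').1
    · simp only [List.foldl_cons]
      rw [hA]
      exact (ih i' m' a' c' p').2

theorem cor_fold (l : List String) :
    ∀ i m a c p : Int,
      l.foldl pvCorStep (St i m a c p) =
        (l.filterMap (fun b => corT.get? b)).foldl pvAddEntry (St i m a c p) ∧
      ∃ i' m' a' c' p', l.foldl pvCorStep (St i m a c p) = St i' m' a' c' p' := by
  induction l with
  | nil => intro i m a c p; exact ⟨rfl, i, m, a, c, p, rfl⟩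
  | cons b l ih =>
    intro i m a c p
    obtain ⟨i', m', a', c', p', hA, hB⟩ := cor_step b i m a c p
    refine ⟨?_, ?_⟩
    · cases hg : corT.get? b with
      | some d =>
        simp only [hg] at hB
        simp only [List.foldl_cons, List.filterMap_cons, hg]
        rw [hA, hB]
        exact (ih i' m' a' c' p').1
      | none =>
        simp only [hg] at hB
        simp only [List.foldl_cons, List.filterMap_cons, hg]
        rw [hA, hB]
        exact (ih i' m' a' c' p').1
    · simp only [List.foldl_cons]
      rw [hA]
      exact (ih i' m' a' c' p').2

theorem match_get?_foldl {β : Type} (d : PySem.Dict String (List String)) (k : String)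
    (step : β → String → β) (bs : β) :
    (match d.get? k with
     | some l => l.foldl step bs
     | none => bs) = (d.getD k []).foldl step bs := by
  cases h : d.get? k <;> simp [PySem.Dict.getD_eq_get?_getD, h]

-- ===== VERDICT (by name: the statement is the Claim_ definition above) =====
theorem convert_magic_buffs_to_caster_stats_spec : Claim_equal_convert_magic_buffs_to_caster_stats := by
  intro ui_buffs food _
  unfold Spec_convert_magic_buffs_to_caster_stats
  unfold convert_magic_buffs_to_caster_stats convert_magic_buffs_to_caster_stats_alt
  simp only [List.foldl_cons, List.foldl_nil, pvCollectSection,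
    match_get?_foldl, foldl_collect, List.nil_append]
  rw [show (PySem.Dict.mk [("INT", (0:Int)), ("MND", 0), ("magic_attack", 0), ("magic_accuracy", 0), ("magic_attack_pct", 0)]) = St 0 0 0 0 0 from rfl]
  rw [show MAGIC_BUFF_ADDITIONS.getD "geo_magic" PySem.Dict.empty = geoT from rfl,
      show MAGIC_BUFF_ADDITIONS.getD "cor_magic" PySem.Dict.empty = corT from rfl,
      show MAGIC_BUFF_ADDITIONS.getD "food_magic" PySem.Dict.empty = foodT from rfl]
  obtain ⟨hgeo, gi, gm, ga, gc, gp, hgsh⟩ := geo_fold ((PySem.Dict.mk ui_buffs).getD "geo" []) 0 0 0 0 0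
  rw [hgeo] at hgsh
  obtain ⟨hcor, ci, cm, ca, cc, cp, hcsh⟩ := cor_fold ((PySem.Dict.mk ui_buffs).getD "cor" []) gi gm ga gc gp
  rw [hcor] at hcsh
  rw [hgeo, hgsh, hcor, hcsh]
  by_cases hf : food = ""
  · rw [if_pos hf, if_pos hf, List.foldl_append, hgsh, hcsh]
  · rw [if_neg hf, if_neg hf]
    cases h : foodT.get? food with
    | some f =>
      have hfs := food_step food ci cm ca cc cp
      simp only [h] at hfs
      dsimp only
      rw [hfs, List.foldl_append, List.foldl_append, hgsh, hcsh]
      rfl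
    | none =>
      dsimp only
      rw [List.foldl_append, hgsh, hcsh]
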